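-- pv_equiv track=rewrite | github.com/flynnlambrechts/bananagrams_engine_comp3821 | tests/test_stage_two.py | get_dump_distribution
-- ===== SOURCE A (Python) =====
-- def get_dump_distribution(results: list):
--     success_dumps = []
--     fail_dumps = []
--     for result in results:
--         if result[2] == True: # if successful game
--             success_dumps.append(result[3])
--         else:
--             fail_dumps.append(result[3])
--     success_dumps_count = {}
--     fail_dumps_count = {}
--     for num_dumps in success_dumps:
--         if num_dumps in success_dumps_count.keys():
--             success_dumps_count[num_dumps] += 1
--         else:
--             success_dumps_count[num_dumps] = 1
--     for num_dumps in fail_dumps: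
--         if num_dumps in fail_dumps_count.keys():
--             fail_dumps_count[num_dumps] += 1
--         else:
--             fail_dumps_count[num_dumps] = 1
--     return (success_dumps_count, fail_dumps_count)
-- ===== SOURCE B (Python) =====
-- def get_dump_distribution(results: list):
--     # single pass: route each result to the matching count dict and bump it
--     success_dumps_count = {}
--     fail_dumps_count = {}
--     for result in results:
--         target = success_dumps_count if result[2] == True else fail_dumps_count
--         target[result[3]] = target.get(result[3], 0) + 1
--     return (success_dumps_count, fail_dumps_count)
-- ===== Notes on version B (the rewrite author's own statement) =====
-- stated objective: simpler
-- what changed: B drops the intermediate success/fail lists and A's two separate membership-test counting loops, doing one pass over results that bumps the matching count dict via .get(key, 0) + 1.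
import Mathlib
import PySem

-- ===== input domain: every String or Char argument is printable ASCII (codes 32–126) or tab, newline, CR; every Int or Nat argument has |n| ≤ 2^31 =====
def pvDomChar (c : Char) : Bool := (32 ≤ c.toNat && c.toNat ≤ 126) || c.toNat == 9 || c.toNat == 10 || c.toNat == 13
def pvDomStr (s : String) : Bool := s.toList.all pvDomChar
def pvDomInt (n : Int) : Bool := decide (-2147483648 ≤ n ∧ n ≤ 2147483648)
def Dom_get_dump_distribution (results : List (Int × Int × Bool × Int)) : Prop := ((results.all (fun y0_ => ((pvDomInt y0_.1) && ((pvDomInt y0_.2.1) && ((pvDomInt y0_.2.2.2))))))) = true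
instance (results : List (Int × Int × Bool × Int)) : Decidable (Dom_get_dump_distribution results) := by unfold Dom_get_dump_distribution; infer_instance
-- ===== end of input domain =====

-- B fuses A's three loops into one pass that bumps the matching count dict directly
-- (objective: simpler — no intermediate success/fail lists, no separate counting loops).

-- ===== PORT A =====
-- counting loop: 'if num_dumps in d.keys(): d[num_dumps] += 1 else: d[num_dumps] = 1'
def pvCountLoopA (l : List Int) : PySem.Dict Int Int :=
  l.foldl (fun d k => if d.contains k then d.modify k 0 (· + 1) else d.insert k 1)
    PySem.Dict.empty

def get_dump_distribution (results : List (Int × Int × Bool × Int)) :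
    (List (Int × Int)) × (List (Int × Int)) :=
  -- first loop: split into success_dumps / fail_dumps by appending
  let lists := results.foldl
    (fun (p : List Int × List Int) r =>
      if r.2.2.1 = true then (p.1 ++ [r.2.2.2], p.2) else (p.1, p.2 ++ [r.2.2.2]))
    ([], [])
  ((pvCountLoopA lists.1).items, (pvCountLoopA lists.2).items)

-- ===== PORT B =====
def get_dump_distribution_alt (results : List (Int × Int × Bool × Int)) :
    (List (Int × Int)) × (List (Int × Int)) :=
  let p := results.foldl
    (fun (p : PySem.Dict Int Int × PySem.Dict Int Int) r =>
      if r.2.2.1 = true then (p.1.insert r.2.2.2 (p.1.getD r.2.2.2 0 + 1), p.2)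
      else (p.1, p.2.insert r.2.2.2 (p.2.getD r.2.2.2 0 + 1)))
    (PySem.Dict.empty, PySem.Dict.empty)
  (p.1.items, p.2.items)

-- ===== PRECONDITION & SPEC =====
def Spec_get_dump_distribution (results : List (Int × Int × Bool × Int)) (out : (List (Int × Int)) × (List (Int × Int))) : Prop := out = get_dump_distribution_alt results
instance (results : List (Int × Int × Bool × Int)) (out : (List (Int × Int)) × (List (Int × Int))) : Decidable (Spec_get_dump_distribution results out) := by unfold Spec_get_dump_distribution; infer_instance

-- ===== CLAIM (what is proved, stated in full; the proofs are below) =====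
def Claim_equal_get_dump_distribution : Prop := ∀ (results : List (Int × Int × Bool × Int)), Dom_get_dump_distribution results → Spec_get_dump_distribution results (get_dump_distribution results)

-- ===== LEMMAS AND PROOFS =====

-- the bump step shared by both counting styles
def pvBump (d : PySem.Dict Int Int) (k : Int) : PySem.Dict Int Int :=
  d.insert k (d.getD k 0 + 1)

-- A's counting step is pvBump in both branches
theorem pvStepA_eq_bump (d : PySem.Dict Int Int) (k : Int) :
    (if d.contains k then d.modify k 0 (· + 1) else d.insert k 1) = pvBump d k := by
  by_cases h : d.contains k = true
  · simp [h, pvBump]; rfl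
  · have hc : d.contains k = false := by simp_all
    simp [pvBump, PySem.Dict.getD_of_not_contains, hc]

theorem pvCountLoopA_eq (l : List Int) :
    pvCountLoopA l = l.foldl pvBump PySem.Dict.empty := by
  unfold pvCountLoopA
  congr 1
  funext d k
  exact pvStepA_eq_bump d k

-- A's splitting loop, characterised (generalizing the accumulators)
theorem pvSplit_eq (results : List (Int × Int × Bool × Int)) (s f : List Int) :
    results.foldl
      (fun (p : List Int × List Int) r =>
        if r.2.2.1 = true then (p.1 ++ [r.2.2.2], p.2) else (p.1, p.2 ++ [r.2.2.2]))
      (s, f)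
    = (s ++ (results.filter (fun r => r.2.2.1)).map (·.2.2.2),
       f ++ (results.filter (fun r => !r.2.2.1)).map (·.2.2.2)) := by
  induction results generalizing s f with
  | nil => simp
  | cons r rs ih =>
    by_cases h : r.2.2.1 = true
    · simp [List.foldl_cons, h, ih]
    · simp [List.foldl_cons, h, ih]

-- B's fused loop, characterised as two independent folds over the split lists
theorem pvFused_eq (results : List (Int × Int × Bool × Int))
    (ds df : PySem.Dict Int Int) :
    results.foldl
      (fun (p : PySem.Dict Int Int × PySem.Dict Int Int) r =>
        if r.2.2.1 = true then (p.1.insert r.2.2.2 (p.1.getD r.2.2.2 0 + 1), p.2)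
        else (p.1, p.2.insert r.2.2.2 (p.2.getD r.2.2.2 0 + 1)))
      (ds, df)
    = (((results.filter (fun r => r.2.2.1)).map (·.2.2.2)).foldl pvBump ds,
       ((results.filter (fun r => !r.2.2.1)).map (·.2.2.2)).foldl pvBump df) := by
  induction results generalizing ds df with
  | nil => simp
  | cons r rs ih =>
    by_cases h : r.2.2.1 = true
    · simp [List.foldl_cons, h, ih, pvBump]
    · simp [List.foldl_cons, h, ih, pvBump]

-- ===== VERDICT (by name: the statement is the Claim_ definition above) =====
theorem get_dump_distribution_spec : Claim_equal_get_dump_distribution := by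
  intro results _
  unfold Spec_get_dump_distribution get_dump_distribution get_dump_distribution_alt
  rw [pvSplit_eq results [] [], pvFused_eq results PySem.Dict.empty PySem.Dict.empty]
  simp [pvCountLoopA_eq]
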